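-- pv_equiv track=rewrite | github.com/TheSacredLazyOne/epistemic_seed | tools/build_frame.py | demote_headings
-- ===== SOURCE A (Python) =====
-- from typing import List
--
-- def demote_headings(md: str, levels: int) -> str:
--     out_lines: List[str] = []
--     for line in md.splitlines():
--         if line.startswith("#"):
--             n = 0
--             while n < len(line) and line[n] == "#":
--                 n += 1
--             if 1 <= n <= 6 and n < len(line) and line[n] == " ":
--                 new_n = min(6, n + levels)
--                 line = ("#" * new_n) + line[n:]
--         out_lines.append(line)
--     return "\n".join(out_lines)
-- ===== SOURCE B (Python) =====
-- def demote_headings(md: str, levels: int) -> str: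
--     # Table-driven: exactly one of the six prefixes "# ", "## ", ..., "###### "
--     # can start a given line, so a precomputed prefix -> replacement table
--     # replaces all counting and guard logic.
--     table = {"#" * n + " ": "#" * min(6, n + levels) + " " for n in range(1, 7)}
--     lines = md.splitlines()
--     for i, line in enumerate(lines):
--         for old, new in table.items():
--             if line.startswith(old):
--                 lines[i] = new + line[len(old):]
--                 break
--     return "\n".join(lines)
-- ===== Notes on version B (the rewrite author's own statement) =====
-- stated objective: alternative
-- what changed: B precomputes a six-entry prefix->replacement table ('# ' .. '###### ') and rewrites each line by its unique matching table prefix, eliminating A's per-character hash-counting while-loop and its length/space guards.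
import Mathlib
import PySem

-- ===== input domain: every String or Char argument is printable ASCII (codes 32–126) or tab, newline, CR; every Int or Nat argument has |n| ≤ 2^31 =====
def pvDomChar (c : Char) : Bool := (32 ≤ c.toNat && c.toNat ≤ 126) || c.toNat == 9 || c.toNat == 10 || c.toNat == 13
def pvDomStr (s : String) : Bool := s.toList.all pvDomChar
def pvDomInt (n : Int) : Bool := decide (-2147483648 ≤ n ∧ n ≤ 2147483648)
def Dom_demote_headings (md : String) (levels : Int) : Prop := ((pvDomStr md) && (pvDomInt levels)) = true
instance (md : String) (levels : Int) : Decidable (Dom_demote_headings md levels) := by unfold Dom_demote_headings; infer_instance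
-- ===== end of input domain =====

-- B replaces A's per-character hash-counting while-loop and its guards with a precomputed
-- six-entry prefix -> replacement table applied to each line (alternative decomposition,
-- proven to return the same string on every input).

-- ===== PORT A =====
-- the 'while n < len(line) and line[n] == "#"' counter, as the obvious structural recursion
def aHashCount : List Char → Nat
  | [] => 0
  | c :: rest => if c == '#' then aHashCount rest + 1 else 0

-- the loop body: one line of A
def aFixLine (line : List Char) (levels : Int) : List Char :=
  if PySem.Chars.startswith line ['#'] then
    let n := aHashCount line
    if 1 ≤ n ∧ n ≤ 6 ∧ n < line.length ∧ PySem.List.pyGet? line (n : Int) = some ' ' then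
      List.replicate (min 6 ((n : Int) + levels)).toNat '#' ++ line.drop n
    else line
  else line

def demote_headings (md : String) (levels : Int) : String :=
  let outLines := (PySem.Chars.splitlines md.toList).foldl
    (fun out line => out ++ [aFixLine line levels]) []
  String.ofList (PySem.Chars.join ['\n'] outLines)

-- ===== PORT B =====
-- the dict comprehension {'#'*n+' ': '#'*min(6,n+levels)+' ' for n in range(1,7)}
-- (a dict is an association list in insertion order per the type convention)
def bTable (levels : Int) : List (List Char × List Char) :=
  (PySem.List.pyRange 1 7 1).map (fun n =>
    (List.replicate n.toNat '#' ++ [' '],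
     List.replicate (min 6 (n + levels)).toNat '#' ++ [' ']))

-- the inner 'for old, new in table.items(): if line.startswith(old): … break' loop
def bRewrite (line : List Char) : List (List Char × List Char) → List Char
  | [] => line
  | (old, new) :: rest =>
      if PySem.Chars.startswith line old then new ++ line.drop old.length
      else bRewrite line rest

def demote_headings_alt (md : String) (levels : Int) : String :=
  let table := bTable levels
  String.ofList (PySem.Chars.join ['\n']
    ((PySem.Chars.splitlines md.toList).map (fun line => bRewrite line table)))

-- ===== PRECONDITION & SPEC =====
def Spec_demote_headings (md : String) (levels : Int) (out : String) : Prop := out = demote_headings_alt md levels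
instance (md : String) (levels : Int) (out : String) : Decidable (Spec_demote_headings md levels out) := by unfold Spec_demote_headings; infer_instance

-- ===== CLAIM (what is proved, stated in full; the proofs are below) =====
def Claim_equal_demote_headings : Prop := ∀ (md : String) (levels : Int), Dom_demote_headings md levels → Spec_demote_headings md levels (demote_headings md levels)

-- ===== LEMMAS AND PROOFS =====

lemma aHashCount_lt (cs : List Char) {k : Nat} (hk : k < aHashCount cs) :
    cs[k]? = some '#' := by
  induction cs generalizing k with
  | nil => simp [aHashCount] at hk
  | cons c rest ih =>
      simp only [aHashCount] at hk
      by_cases h : c == '#'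
      · simp [h] at hk
        cases k with
        | zero => simpa using (by simpa using h)
        | succ k => simpa using ih (by omega)
      · simp [h] at hk

lemma aHashCount_at (cs : List Char) :
    cs[aHashCount cs]? ≠ some '#' := by
  induction cs with
  | nil => simp [aHashCount]
  | cons c rest ih =>
      simp only [aHashCount]
      by_cases h : c == '#'
      · simpa [h] using ih
      · simp [h]
        intro hc
        simp [hc] at h

lemma aHashCount_eq (cs : List Char) (m : Nat)
    (hall : ∀ k < m, cs[k]? = some '#') (hm : cs[m]? ≠ some '#') :
    aHashCount cs = m := by
  rcases Nat.lt_trichotomy (aHashCount cs) m with h | h | h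
  · exact absurd (hall _ h) (aHashCount_at cs)
  · exact h
  · exact absurd (aHashCount_lt cs h) hm

-- the n-th table prefix starts a line iff the line has exactly n leading hashes then a space
lemma startswith_pattern_iff (cs : List Char) (n : Nat) :
    PySem.Chars.startswith cs (List.replicate n '#' ++ [' ']) = true ↔
      (aHashCount cs = n ∧ cs[n]? = some ' ') := by
  rw [PySem.Chars.startswith_iff]
  constructor
  · intro hp
    have hlen : n + 1 ≤ cs.length := by
      have := hp.length_le; simpa using this
    have htake : cs.take (n + 1) = List.replicate n '#' ++ [' '] := by
      have := List.prefix_iff_eq_take.1 hp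
      simpa using this.symm
    have hget : ∀ k, k < n + 1 → cs[k]? = (List.replicate n '#' ++ [' '])[k]? := by
      intro k hk
      have : (cs.take (n+1))[k]? = cs[k]? := List.getElem?_take_of_lt hk
      rw [← this, htake]
    have hspace : cs[n]? = some ' ' := by
      rw [hget n (by omega)]
      simp
    refine ⟨aHashCount_eq cs n (fun k hk => ?_) (by rw [hspace]; simp), hspace⟩
    rw [hget k (by omega)]
    rw [List.getElem?_append_left (by simpa using hk)]
    simp [hk]
  · rintro ⟨hc, hsp⟩
    have hlen : n < cs.length := by
      by_contra hl
      rw [List.getElem?_eq_none (Nat.le_of_not_lt hl)] at hsp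
      cases hsp
    rw [List.prefix_iff_eq_take]
    apply List.ext_getElem
    · simp; omega
    · intro k hk1 hk2
      simp only [List.length_append, List.length_replicate, List.length_singleton] at hk1
      by_cases hkn : k < n
      · rw [List.getElem_append_left (by simpa using hkn)]
        have := aHashCount_lt cs (k := k) (by omega)
        rw [List.getElem?_eq_getElem (by omega)] at this
        simp at this
        simp [this]
      · have hk : k = n := by omega
        subst hk
        rw [List.getElem_append_right (by simp)]
        rw [List.getElem?_eq_getElem hlen] at hsp
        simp at hsp
        simp [hsp]

lemma pyRange17 : PySem.List.pyRange 1 7 1 = [1, 2, 3, 4, 5, 6] := by decide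

-- Bool form of the previous lemma, usable as a rewrite
lemma startswith_pattern_eq (cs : List Char) (n : Nat) :
    PySem.Chars.startswith cs (List.replicate n '#' ++ [' ']) =
      decide (aHashCount cs = n ∧ cs[n]? = some ' ') := by
  by_cases h : aHashCount cs = n ∧ cs[n]? = some ' '
  · simp [h, (startswith_pattern_iff cs n).2 h]
  · simp only [h, decide_false]
    rw [← Bool.not_eq_true]
    exact fun hc => h ((startswith_pattern_iff cs n).1 hc)

lemma fixLine_eq (levels : Int) (cs : List Char) :
    aFixLine cs levels = bRewrite cs (bTable levels) := by
  have htab : bTable levels = [1, 2, 3, 4, 5, 6].map (fun n =>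
      (List.replicate n.toNat '#' ++ [' '],
       List.replicate (min 6 (n + levels)).toNat '#' ++ [' '])) := by
    rw [bTable, pyRange17]
  by_cases hA : 1 ≤ aHashCount cs ∧ aHashCount cs ≤ 6 ∧ aHashCount cs < cs.length ∧
      PySem.List.pyGet? cs ((aHashCount cs : Nat) : Int) = some ' '
  · obtain ⟨h1, h6, hlen, hsp⟩ := hA
    set m := aHashCount cs with hm
    have hsp' : cs[m]? = some ' ' := by
      simpa [PySem.List.pyGet?_natCast] using hsp
    have hstart : PySem.Chars.startswith cs ['#'] = true := by
      rw [PySem.Chars.startswith_iff]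
      have h0 : cs[0]? = some '#' := aHashCount_lt cs (by omega)
      cases cs with
      | nil => simp at h0
      | cons c rest => simp at h0; simp [h0]
    have hdropm : cs.drop m = ' ' :: cs.drop (m + 1) := by
      rw [List.drop_eq_getElem_cons hlen]
      rw [List.getElem?_eq_getElem hlen] at hsp'
      simp at hsp'
      rw [hsp']
    have hAval : aFixLine cs levels =
        List.replicate (min 6 ((m : Int) + levels)).toNat '#' ++ (' ' :: cs.drop (m + 1)) := by
      rw [aFixLine, if_pos hstart]
      rw [if_pos ⟨h1, h6, hlen, hsp⟩, ← hm, hdropm]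
    rw [hAval, htab]
    interval_cases m <;>
      simp only [List.map_cons, List.map_nil, bRewrite, startswith_pattern_eq] <;>
      simp [hsp', ← hm]
  · have hAeq : aFixLine cs levels = cs := by
      rw [aFixLine]
      split
      · rw [if_neg hA]
      · rfl
    have hno : ∀ n : Nat, 1 ≤ n → n ≤ 6 →
        ¬ (aHashCount cs = n ∧ cs[n]? = some ' ') := by
      rintro n hn1 hn6 ⟨hc, hsp⟩
      have hlen : n < cs.length := by
        by_contra hl
        rw [List.getElem?_eq_none (Nat.le_of_not_lt hl)] at hsp
        cases hsp
      exact hA ⟨by omega, by omega, by omega, by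
        rw [hc, PySem.List.pyGet?_natCast, hsp]⟩
    rw [hAeq, htab]
    simp only [List.map_cons, List.map_nil, bRewrite, startswith_pattern_eq]
    simp [hno 1 (by norm_num) (by norm_num), hno 2 (by norm_num) (by norm_num),
      hno 3 (by norm_num) (by norm_num), hno 4 (by norm_num) (by norm_num),
      hno 5 (by norm_num) (by norm_num), hno 6 (by norm_num) (by norm_num)]

-- ===== VERDICT (by name: the statement is the Claim_ definition above) =====
theorem demote_headings_spec : Claim_equal_demote_headings := by
  intro md levels _
  unfold Spec_demote_headings demote_headings demote_headings_alt
  rw [PySem.List.foldl_append_singleton_eq_map]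
  simp only [List.nil_append]
  congr 1
  exact congrArg _ (List.map_congr_left (fun line _ => fixLine_eq levels line))
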